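-- pv_equiv track=rewrite | github.com/Leapense/problems | 15993번: 1, 2, 3 더하기 8/test.py | dp_compute
-- ===== SOURCE A (Python) =====
-- MOD = 10 ** 9 + 9
--
-- def dp_compute(max_n):
--     odd = [0] * (max_n + 4)
--     even = [0] * (max_n + 4)
--     even[0] = 1
--
--     for i in range(1, max_n + 1):
--         new_odd = 0
--         new_even = 0
--         if i - 1 >= 0:
--             new_odd = (new_odd + even[i - 1]) % MOD
--             new_even = (new_even + odd[i - 1]) % MOD
--         if i - 2 >= 0:
--             new_odd = (new_odd + even[i - 2]) % MOD
--             new_even = (new_even + odd[i - 2]) % MOD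
--         if i - 3 >= 0:
--             new_odd = (new_odd + even[i - 3]) % MOD
--             new_even = (new_even + odd[i - 3]) % MOD
--         odd[i] = new_odd
--         even[i] = new_even
--     return odd, even
-- ===== SOURCE B (Python) =====
-- MOD = 10 ** 9 + 9
--
-- def dp_compute(max_n):
--     # Tribonacci on the running total s = odd + even and the signed difference
--     # a = even - odd, recombined per index with the modular inverse of 2;
--     # the rolling three-term windows replace the mutually recursive table reads.
--     inv2 = (MOD + 1) // 2
--     odd = [0] * (max_n + 4)
--     even = [0] * (max_n + 4)
--     even[0] = 1
--     s1, s2, s3 = 1, 0, 0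
--     a1, a2, a3 = 1, 0, 0
--     for i in range(1, max_n + 1):
--         s = (s1 + s2 + s3) % MOD
--         a = -(a1 + a2 + a3) % MOD
--         odd[i] = (s - a) * inv2 % MOD
--         even[i] = (s + a) * inv2 % MOD
--         s1, s2, s3 = s, s1, s2
--         a1, a2, a3 = a, a1, a2
--     return odd, even
-- ===== Notes on version B (the rewrite author's own statement) =====
-- stated objective: alternative
-- what changed: Replaces the two mutually-recursive parity table reads (guarded lookups even[i-1..i-3]/odd[i-1..i-3]) with two rolling three-term windows for the tribonacci total s=odd+even and the alternating difference a=even-odd, recombining each entry via the modular inverse of 2; Pre_ excludes max_n <= -4, on which A raises IndexError.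
import Mathlib
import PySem

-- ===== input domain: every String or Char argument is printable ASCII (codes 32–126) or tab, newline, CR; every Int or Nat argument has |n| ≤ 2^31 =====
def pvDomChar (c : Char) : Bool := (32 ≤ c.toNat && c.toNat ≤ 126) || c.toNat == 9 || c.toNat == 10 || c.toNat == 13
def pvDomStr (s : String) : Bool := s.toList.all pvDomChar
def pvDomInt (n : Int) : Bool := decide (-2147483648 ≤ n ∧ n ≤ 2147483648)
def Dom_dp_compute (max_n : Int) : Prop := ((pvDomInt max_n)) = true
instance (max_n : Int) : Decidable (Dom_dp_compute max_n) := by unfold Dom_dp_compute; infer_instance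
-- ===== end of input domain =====

-- B replaces the mutually recursive guarded table reads with two rolling three-term
-- windows (tribonacci total s = odd+even and alternating difference a = even-odd),
-- recombined per index with the modular inverse of 2 (alternative decomposition, same cost).

-- ===== PORT A =====
def pvMOD : Int := 10 ^ 9 + 9

def pvBodyA (st : List Int × List Int) (i : Int) : List Int × List Int :=
  let no0 : Int := 0
  let ne0 : Int := 0
  let no1 := if i - 1 ≥ 0 then PySem.Int.mod (no0 + PySem.List.pyGetD st.2 (i - 1) 0) pvMOD else no0
  let ne1 := if i - 1 ≥ 0 then PySem.Int.mod (ne0 + PySem.List.pyGetD st.1 (i - 1) 0) pvMOD else ne0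
  let no2 := if i - 2 ≥ 0 then PySem.Int.mod (no1 + PySem.List.pyGetD st.2 (i - 2) 0) pvMOD else no1
  let ne2 := if i - 2 ≥ 0 then PySem.Int.mod (ne1 + PySem.List.pyGetD st.1 (i - 2) 0) pvMOD else ne1
  let no3 := if i - 3 ≥ 0 then PySem.Int.mod (no2 + PySem.List.pyGetD st.2 (i - 3) 0) pvMOD else no2
  let ne3 := if i - 3 ≥ 0 then PySem.Int.mod (ne2 + PySem.List.pyGetD st.1 (i - 3) 0) pvMOD else ne2
  (PySem.List.pySetD st.1 i no3, PySem.List.pySetD st.2 i ne3)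

-- indexed reads/writes are in range for every loop index under Pre_; even[0] = 1 raises for max_n ≤ -4 (outside Pre_)
def dp_compute (max_n : Int) : List Int × List Int :=
  let odd := List.replicate (max_n + 4).toNat (0 : Int)
  let even := PySem.List.pySetD (List.replicate (max_n + 4).toNat (0 : Int)) 0 1
  (PySem.List.pyRange 1 (max_n + 1) 1).foldl pvBodyA (odd, even)

-- ===== PORT B =====
-- state: (odd, even, s1, s2, s3, a1, a2, a3)
def pvStB : Type := List Int × List Int × Int × Int × Int × Int × Int × Int

def pvBodyB (inv2 : Int) (st : pvStB) (i : Int) : pvStB :=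
  let s := PySem.Int.mod (st.2.2.1 + st.2.2.2.1 + st.2.2.2.2.1) pvMOD
  let a := PySem.Int.mod (-(st.2.2.2.2.2.1 + st.2.2.2.2.2.2.1 + st.2.2.2.2.2.2.2)) pvMOD
  (PySem.List.pySetD st.1 i (PySem.Int.mod ((s - a) * inv2) pvMOD),
   PySem.List.pySetD st.2.1 i (PySem.Int.mod ((s + a) * inv2) pvMOD),
   s, st.2.2.1, st.2.2.2.1, a, st.2.2.2.2.2.1, st.2.2.2.2.2.2.1)

-- even[0] = 1 raises for max_n ≤ -4 (outside Pre_), as in Source B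
def dp_compute_alt (max_n : Int) : List Int × List Int :=
  let inv2 := PySem.Int.floordiv (pvMOD + 1) 2
  let odd := List.replicate (max_n + 4).toNat (0 : Int)
  let even := PySem.List.pySetD (List.replicate (max_n + 4).toNat (0 : Int)) 0 1
  let st := (PySem.List.pyRange 1 (max_n + 1) 1).foldl (pvBodyB inv2)
    ((odd, even, 1, 0, 0, 1, 0, 0) : pvStB)
  (st.1, st.2.1)

-- ===== PRECONDITION & SPEC =====
-- Pre_ excludes exactly max_n ≤ -4, on which the Python A raises IndexError (even[0] = 1 on an empty list).
def Pre_dp_compute (max_n : Int) : Prop := -3 ≤ max_n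
instance (max_n : Int) : Decidable (Pre_dp_compute max_n) := by unfold Pre_dp_compute; infer_instance
def pvWitness_dp_compute : Int := 5

def Spec_dp_compute (max_n : Int) (out : List Int × List Int) : Prop := out = dp_compute_alt max_n
instance (max_n : Int) (out : List Int × List Int) : Decidable (Spec_dp_compute max_n out) := by unfold Spec_dp_compute; infer_instance

-- ===== CLAIM (what is proved, stated in full; the proofs are below) =====
def Claim_equal_dp_compute : Prop := ∀ (max_n : Int), Dom_dp_compute max_n → Pre_dp_compute max_n → Spec_dp_compute max_n (dp_compute max_n)

-- ===== LEMMAS AND PROOFS =====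

-- the parity sequences A computes: pvOE j = (odd[j], even[j]) for filled indices
def pvOE : Nat → Int × Int
  | 0 => (0, 1)
  | 1 => (PySem.Int.mod (0 + (pvOE 0).2) pvMOD, PySem.Int.mod (0 + (pvOE 0).1) pvMOD)
  | 2 => (PySem.Int.mod (PySem.Int.mod (0 + (pvOE 1).2) pvMOD + (pvOE 0).2) pvMOD,
          PySem.Int.mod (PySem.Int.mod (0 + (pvOE 1).1) pvMOD + (pvOE 0).1) pvMOD)
  | (n + 3) =>
      (PySem.Int.mod (PySem.Int.mod (PySem.Int.mod (0 + (pvOE (n + 2)).2) pvMOD + (pvOE (n + 1)).2) pvMOD + (pvOE n).2) pvMOD,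
       PySem.Int.mod (PySem.Int.mod (PySem.Int.mod (0 + (pvOE (n + 2)).1) pvMOD + (pvOE (n + 1)).1) pvMOD + (pvOE n).1) pvMOD)

-- array contents after A has processed indices 1..k
def pvFO (k j : Nat) : Int := if j ≤ k then (pvOE j).1 else 0
def pvFE (k j : Nat) : Int := if j ≤ k then (pvOE j).2 else 0

-- the sequences B computes: pvS j = (s_j, a_j)
def pvS : Nat → Int × Int
  | 0 => (1, 1)
  | 1 => (PySem.Int.mod ((pvS 0).1 + 0 + 0) pvMOD, PySem.Int.mod (-((pvS 0).2 + 0 + 0)) pvMOD)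
  | 2 => (PySem.Int.mod ((pvS 1).1 + (pvS 0).1 + 0) pvMOD,
          PySem.Int.mod (-((pvS 1).2 + (pvS 0).2 + 0)) pvMOD)
  | (j + 3) => (PySem.Int.mod ((pvS (j + 2)).1 + (pvS (j + 1)).1 + (pvS j).1) pvMOD,
                PySem.Int.mod (-((pvS (j + 2)).2 + (pvS (j + 1)).2 + (pvS j).2)) pvMOD)

-- rolling-window values as functions of an Int offset (0 below index 0)
def pvP (t : Int) : Int := if 0 ≤ t then (pvS t.toNat).1 else 0
def pvQ (t : Int) : Int := if 0 ≤ t then (pvS t.toNat).2 else 0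

-- B's per-index recombined outputs and array contents after processing 1..k
def pvGO (inv2 : Int) (k j : Nat) : Int :=
  if 1 ≤ j ∧ j ≤ k then PySem.Int.mod (((pvS j).1 - (pvS j).2) * inv2) pvMOD else 0
def pvGE (inv2 : Int) (k j : Nat) : Int :=
  if 1 ≤ j ∧ j ≤ k then PySem.Int.mod (((pvS j).1 + (pvS j).2) * inv2) pvMOD
  else if j = 0 then 1 else 0

lemma pv_hM : (0 : Int) < pvMOD := by norm_num [pvMOD]

lemma pv_hMe : pvMOD = 1000000009 := by norm_num [pvMOD]

lemma pv_set_map_range (f : Nat → Int) (n : Nat) (i : Nat) (v : Int) :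
    ((List.range n).map f).set i v = (List.range n).map (fun j => if j = i then v else f j) := by
  apply List.ext_getElem (by simp)
  intro idx h1 h2
  simp only [List.getElem_set, List.getElem_map, List.getElem_range]
  by_cases h : i = idx
  · subst h; simp
  · rw [if_neg h, if_neg (fun hh => h hh.symm)]

lemma pv_mod_bounds (a : Int) : 0 ≤ PySem.Int.mod a pvMOD ∧ PySem.Int.mod a pvMOD < pvMOD :=
  ⟨PySem.Int.mod_nonneg a pv_hM, PySem.Int.mod_lt a pv_hM⟩

lemma pvOE_nonneg (j : Nat) : 0 ≤ (pvOE j).1 ∧ (pvOE j).1 < pvMOD ∧ 0 ≤ (pvOE j).2 ∧ (pvOE j).2 < pvMOD := by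
  match j with
  | 0 => decide
  | 1 => decide
  | 2 => decide
  | (n + 3) => exact ⟨(pv_mod_bounds _).1, (pv_mod_bounds _).2, (pv_mod_bounds _).1, (pv_mod_bounds _).2⟩

lemma pv_read (f : Nat → Int) (n : Nat) (i : Int) (j : Nat) (hij : i = (j : Int)) (h : j < n) :
    PySem.List.pyGetD ((List.range n).map f) i 0 = f j := by
  subst hij
  rw [PySem.List.pyGetD_natCast, PySem.List.getD_map_range f n j 0 h]

lemma pvFO_of_le {k j : Nat} (h : j ≤ k) : pvFO k j = (pvOE j).1 := if_pos h
lemma pvFE_of_le {k j : Nat} (h : j ≤ k) : pvFE k j = (pvOE j).2 := if_pos h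

lemma pv_fill_O (n k : Nat) (i : Int) (hi : i = (k : Int) + 1) :
    (((List.range n).map (pvFO k)).set i.toNat ((pvOE (k + 1)).1)) = (List.range n).map (pvFO (k + 1)) := by
  have hit : i.toNat = k + 1 := by omega
  rw [hit, pv_set_map_range]
  apply congrArg (fun f => List.map f (List.range n))
  funext j
  by_cases hj : j = k + 1
  · subst hj; simp [pvFO]
  · rw [if_neg hj]
    unfold pvFO
    split_ifs <;> first | rfl | omega

lemma pv_fill_E (n k : Nat) (i : Int) (hi : i = (k : Int) + 1) :
    (((List.range n).map (pvFE k)).set i.toNat ((pvOE (k + 1)).2)) = (List.range n).map (pvFE (k + 1)) := by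
  have hit : i.toNat = k + 1 := by omega
  rw [hit, pv_set_map_range]
  apply congrArg (fun f => List.map f (List.range n))
  funext j
  by_cases hj : j = k + 1
  · subst hj; simp [pvFE]
  · rw [if_neg hj]
    unfold pvFE
    split_ifs <;> first | rfl | omega

-- step of A's loop, in Nat form
lemma pv_stepA (K k : Nat) (hk : k + 1 ≤ K) :
    pvBodyA ((List.range (K + 4)).map (pvFO k), (List.range (K + 4)).map (pvFE k)) ((k : Int) + 1)
      = ((List.range (K + 4)).map (pvFO (k + 1)), (List.range (K + 4)).map (pvFE (k + 1))) := by
  unfold pvBodyA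
  dsimp only
  match k with
  | 0 =>
    split_ifs with h1 h2 h3 <;> try (exfalso; omega)
    rw [pv_read (pvFE 0) (K + 4) _ 0 (by omega) (by omega),
        pv_read (pvFO 0) (K + 4) _ 0 (by omega) (by omega),
        pvFE_of_le (by omega), pvFO_of_le (by omega),
        PySem.List.pySetD_of_nonneg _ _ (by omega),
        PySem.List.pySetD_of_nonneg _ _ (by omega),
        show PySem.Int.mod (0 + (pvOE 0).2) pvMOD = (pvOE (0 + 1)).1 from by decide,
        show PySem.Int.mod (0 + (pvOE 0).1) pvMOD = (pvOE (0 + 1)).2 from by decide,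
        pv_fill_O (K + 4) 0 (((0 : Nat) : Int) + 1) rfl,
        pv_fill_E (K + 4) 0 (((0 : Nat) : Int) + 1) rfl]
  | 1 =>
    split_ifs with h1 h2 h3 <;> try (exfalso; omega)
    rw [pv_read (pvFE 1) (K + 4) _ 1 (by omega) (by omega),
        pv_read (pvFO 1) (K + 4) _ 1 (by omega) (by omega),
        pv_read (pvFE 1) (K + 4) _ 0 (by omega) (by omega),
        pv_read (pvFO 1) (K + 4) _ 0 (by omega) (by omega),
        pvFE_of_le (by omega), pvFO_of_le (by omega),
        pvFE_of_le (by omega), pvFO_of_le (by omega),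
        PySem.List.pySetD_of_nonneg _ _ (by omega),
        PySem.List.pySetD_of_nonneg _ _ (by omega),
        show PySem.Int.mod (PySem.Int.mod (0 + (pvOE 1).2) pvMOD + (pvOE 0).2) pvMOD = (pvOE (1 + 1)).1 from by decide,
        show PySem.Int.mod (PySem.Int.mod (0 + (pvOE 1).1) pvMOD + (pvOE 0).1) pvMOD = (pvOE (1 + 1)).2 from by decide,
        pv_fill_O (K + 4) 1 (((1 : Nat) : Int) + 1) rfl,
        pv_fill_E (K + 4) 1 (((1 : Nat) : Int) + 1) rfl]
  | (m + 2) =>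
    have hvalO : (pvOE (m + 2 + 1)).1
        = PySem.Int.mod (PySem.Int.mod (PySem.Int.mod (0 + (pvOE (m + 2)).2) pvMOD + (pvOE (m + 1)).2) pvMOD + (pvOE m).2) pvMOD := by
      rw [show m + 2 + 1 = m + 3 from by omega]
      simp [pvOE]
    have hvalE : (pvOE (m + 2 + 1)).2
        = PySem.Int.mod (PySem.Int.mod (PySem.Int.mod (0 + (pvOE (m + 2)).1) pvMOD + (pvOE (m + 1)).1) pvMOD + (pvOE m).1) pvMOD := by
      rw [show m + 2 + 1 = m + 3 from by omega]
      simp [pvOE]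
    split_ifs with h1 h2 h3 <;> try (exfalso; omega)
    rw [pv_read (pvFE (m + 2)) (K + 4) _ (m + 2) (by omega) (by omega),
        pv_read (pvFO (m + 2)) (K + 4) _ (m + 2) (by omega) (by omega),
        pv_read (pvFE (m + 2)) (K + 4) _ (m + 1) (by omega) (by omega),
        pv_read (pvFO (m + 2)) (K + 4) _ (m + 1) (by omega) (by omega),
        pv_read (pvFE (m + 2)) (K + 4) _ m (by omega) (by omega),
        pv_read (pvFO (m + 2)) (K + 4) _ m (by omega) (by omega),
        pvFE_of_le (by omega), pvFO_of_le (by omega),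
        pvFE_of_le (by omega), pvFO_of_le (by omega),
        pvFE_of_le (by omega), pvFO_of_le (by omega),
        PySem.List.pySetD_of_nonneg _ _ (by omega),
        PySem.List.pySetD_of_nonneg _ _ (by omega),
        ← hvalO, ← hvalE,
        pv_fill_O (K + 4) (m + 2) (((m + 2 : Nat) : Int) + 1) rfl,
        pv_fill_E (K + 4) (m + 2) (((m + 2 : Nat) : Int) + 1) rfl]

lemma pv_loopA (K : Nat) : ∀ (d k : Nat), k + d = K →
    (PySem.List.pyRange ((k : Int) + 1) ((K : Int) + 1)).foldl pvBodyA
      ((List.range (K + 4)).map (pvFO k), (List.range (K + 4)).map (pvFE k))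
    = ((List.range (K + 4)).map (pvFO K), (List.range (K + 4)).map (pvFE K)) := by
  intro d
  induction d with
  | zero =>
    intro k hk
    have hkK : k = K := by omega
    subst hkK
    rw [PySem.List.pyRange_one_eq_nil (by omega)]
    rfl
  | succ d ih =>
    intro k hk
    rw [PySem.List.pyRange_one_cons (by omega : ((k : Int) + 1) < (K : Int) + 1),
        List.foldl_cons, pv_stepA K k (by omega)]
    have hc : ((k : Int) + 1) + 1 = ((k + 1 : Nat) : Int) + 1 := by push_cast; ring
    rw [hc]
    exact ih (k + 1) (by omega)

lemma pv_init_O (n : Nat) : List.replicate n (0 : Int) = (List.range n).map (pvFO 0) := by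
  apply List.ext_getElem (by simp)
  intro idx h1 h2
  simp only [List.getElem_replicate, List.getElem_map, List.getElem_range]
  unfold pvFO
  split_ifs with h
  · have : idx = 0 := by omega
    subst this
    norm_num [pvOE]
  · rfl

lemma pv_init_E (n : Nat) : (List.replicate n (0 : Int)).set 0 1 = (List.range n).map (pvFE 0) := by
  apply List.ext_getElem (by simp)
  intro idx h1 h2
  simp only [List.getElem_set, List.getElem_replicate, List.getElem_map, List.getElem_range]
  unfold pvFE
  by_cases h : idx = 0
  · subst h
    norm_num [pvOE]
  · rw [if_neg (fun hh => h hh.symm), if_neg (by omega)]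

-- characterization of A
lemma pv_A_char (max_n : Int) (h : -3 ≤ max_n) :
    dp_compute max_n = ((List.range (max_n + 4).toNat).map (pvFO max_n.toNat),
                        (List.range (max_n + 4).toNat).map (pvFE max_n.toNat)) := by
  unfold dp_compute
  dsimp only
  rw [PySem.List.pySetD_of_nonneg _ _ (by omega)]
  by_cases hpos : 0 ≤ max_n
  · have hK4 : (max_n + 4).toNat = max_n.toNat + 4 := by omega
    rw [hK4, show (0 : Int).toNat = 0 from rfl, pv_init_E (max_n.toNat + 4), pv_init_O (max_n.toNat + 4)]
    have good := pv_loopA max_n.toNat max_n.toNat 0 (by omega)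
    have h1 : ((0 : Nat) : Int) + 1 = 1 := by norm_num
    rw [h1] at good
    have h2 : ((max_n.toNat : Nat) : Int) + 1 = max_n + 1 := by omega
    rw [h2] at good
    exact good
  · rw [PySem.List.pyRange_one_eq_nil (by omega : max_n + 1 ≤ 1)]
    have h0 : max_n.toNat = 0 := by omega
    rw [h0, show (0 : Int).toNat = 0 from rfl, pv_init_E, pv_init_O]
    rfl

lemma pvP_pos (t : Int) (h : 0 ≤ t) : pvP t = (pvS t.toNat).1 := if_pos h
lemma pvP_neg (t : Int) (h : t < 0) : pvP t = 0 := if_neg (by omega)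
lemma pvQ_pos (t : Int) (h : 0 ≤ t) : pvQ t = (pvS t.toNat).2 := if_pos h
lemma pvQ_neg (t : Int) (h : t < 0) : pvQ t = 0 := if_neg (by omega)

-- B's recurrence step computes pvS (m+1) from the rolling window at m
lemma pv_s_eq (m : Nat) :
    (PySem.Int.mod (pvP (m : Int) + pvP ((m : Int) - 1) + pvP ((m : Int) - 2)) pvMOD,
     PySem.Int.mod (-(pvQ (m : Int) + pvQ ((m : Int) - 1) + pvQ ((m : Int) - 2))) pvMOD)
    = pvS (m + 1) := by
  match m with
  | 0 =>
    rw [pvP_pos _ (by omega), pvP_neg _ (by omega), pvP_neg _ (by omega),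
        pvQ_pos _ (by omega), pvQ_neg _ (by omega), pvQ_neg _ (by omega)]
    simp [pvS]
  | 1 =>
    rw [pvP_pos _ (by omega), pvP_pos _ (by omega), pvP_neg _ (by omega),
        pvQ_pos _ (by omega), pvQ_pos _ (by omega), pvQ_neg _ (by omega),
        show (((1 : Nat) : Int) - 1).toNat = 0 from by omega]
    simp [pvS]
  | (m + 2) =>
    rw [pvP_pos _ (by omega), pvP_pos _ (by omega), pvP_pos _ (by omega),
        pvQ_pos _ (by omega), pvQ_pos _ (by omega), pvQ_pos _ (by omega),
        show (((m + 2 : Nat) : Int) - 1).toNat = m + 1 from by omega,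
        show (((m + 2 : Nat) : Int) - 2).toNat = m from by omega,
        show ((m + 2 : Nat) : Int).toNat = m + 2 from by omega]
    simp only [pvS]

lemma pv_fill_GO (inv2 : Int) (n k : Nat) (i : Int) (hi : i = (k : Int) + 1) :
    (((List.range n).map (pvGO inv2 k)).set i.toNat
        (PySem.Int.mod (((pvS (k + 1)).1 - (pvS (k + 1)).2) * inv2) pvMOD))
      = (List.range n).map (pvGO inv2 (k + 1)) := by
  have hit : i.toNat = k + 1 := by omega
  rw [hit, pv_set_map_range]
  apply congrArg (fun f => List.map f (List.range n))
  funext j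
  by_cases hj : j = k + 1
  · subst hj; simp [pvGO]
  · rw [if_neg hj]
    unfold pvGO
    split_ifs <;> first | rfl | omega

lemma pv_fill_GE (inv2 : Int) (n k : Nat) (i : Int) (hi : i = (k : Int) + 1) :
    (((List.range n).map (pvGE inv2 k)).set i.toNat
        (PySem.Int.mod (((pvS (k + 1)).1 + (pvS (k + 1)).2) * inv2) pvMOD))
      = (List.range n).map (pvGE inv2 (k + 1)) := by
  have hit : i.toNat = k + 1 := by omega
  rw [hit, pv_set_map_range]
  apply congrArg (fun f => List.map f (List.range n))
  funext j
  by_cases hj : j = k + 1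
  · subst hj; simp [pvGE]
  · rw [if_neg hj]
    unfold pvGE
    split_ifs <;> first | rfl | omega

-- step of B's loop
lemma pv_stepB (inv2 : Int) (n k : Nat) :
    pvBodyB inv2
      ((List.range n).map (pvGO inv2 k), (List.range n).map (pvGE inv2 k),
       pvP (k : Int), pvP ((k : Int) - 1), pvP ((k : Int) - 2),
       pvQ (k : Int), pvQ ((k : Int) - 1), pvQ ((k : Int) - 2)) ((k : Int) + 1)
    = ((List.range n).map (pvGO inv2 (k + 1)), (List.range n).map (pvGE inv2 (k + 1)),
       pvP ((k : Int) + 1), pvP (k : Int), pvP ((k : Int) - 1),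
       pvQ ((k : Int) + 1), pvQ (k : Int), pvQ ((k : Int) - 1)) := by
  unfold pvBodyB
  dsimp only
  have hs := pv_s_eq k
  have hs1 : PySem.Int.mod (pvP (k : Int) + pvP ((k : Int) - 1) + pvP ((k : Int) - 2)) pvMOD = (pvS (k + 1)).1 := by
    rw [← hs]
  have hs2 : PySem.Int.mod (-(pvQ (k : Int) + pvQ ((k : Int) - 1) + pvQ ((k : Int) - 2))) pvMOD = (pvS (k + 1)).2 := by
    rw [← hs]
  rw [hs1, hs2,
      PySem.List.pySetD_of_nonneg _ _ (by omega),
      PySem.List.pySetD_of_nonneg _ _ (by omega),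
      pv_fill_GO inv2 n k ((k : Int) + 1) rfl,
      pv_fill_GE inv2 n k ((k : Int) + 1) rfl,
      pvP_pos ((k : Int) + 1) (by omega), pvQ_pos ((k : Int) + 1) (by omega),
      show (((k : Int)) + 1).toNat = k + 1 from by omega]

lemma pv_loopB (inv2 : Int) (n K : Nat) : ∀ (d k : Nat), k + d = K →
    (PySem.List.pyRange ((k : Int) + 1) ((K : Int) + 1)).foldl (pvBodyB inv2)
      ((List.range n).map (pvGO inv2 k), (List.range n).map (pvGE inv2 k),
       pvP (k : Int), pvP ((k : Int) - 1), pvP ((k : Int) - 2),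
       pvQ (k : Int), pvQ ((k : Int) - 1), pvQ ((k : Int) - 2))
    = ((List.range n).map (pvGO inv2 K), (List.range n).map (pvGE inv2 K),
       pvP (K : Int), pvP ((K : Int) - 1), pvP ((K : Int) - 2),
       pvQ (K : Int), pvQ ((K : Int) - 1), pvQ ((K : Int) - 2)) := by
  intro d
  induction d with
  | zero =>
    intro k hk
    have hkK : k = K := by omega
    subst hkK
    rw [PySem.List.pyRange_one_eq_nil (by omega)]
    rfl
  | succ d ih =>
    intro k hk
    rw [PySem.List.pyRange_one_cons (by omega : ((k : Int) + 1) < (K : Int) + 1),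
        List.foldl_cons, pv_stepB inv2 n k]
    have := ih (k + 1) (by omega)
    rw [show ((k + 1 : Nat) : Int) = (k : Int) + 1 from by push_cast; ring] at this
    rw [show (k : Int) + 1 - 1 = (k : Int) from by ring,
        show (k : Int) + 1 - 2 = (k : Int) - 1 from by ring] at this
    exact this

-- s_j ≡ odd_j + even_j  and  a_j ≡ even_j - odd_j  (mod pvMOD)
lemma pv_S_modeq : ∀ (j : Nat),
    Int.ModEq pvMOD (pvS j).1 ((pvOE j).1 + (pvOE j).2)
    ∧ Int.ModEq pvMOD (pvS j).2 ((pvOE j).2 - (pvOE j).1)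
  | 0 => by
    simp only [pvS, pvOE]
    constructor <;> decide
  | 1 => by
    simp only [pvS, pvOE]
    constructor <;> decide
  | 2 => by
    simp only [pvS, pvOE]
    constructor <;> decide
  | (j + 3) => by
    obtain ⟨h21, h22⟩ := pv_S_modeq (j + 2)
    obtain ⟨h11, h12⟩ := pv_S_modeq (j + 1)
    obtain ⟨h01, h02⟩ := pv_S_modeq j
    simp only [pvS, pvOE]
    unfold Int.ModEq at h21 h22 h11 h12 h01 h02 ⊢
    simp only [PySem.Int.mod_eq_emod_of_pos pv_hM] at h21 h22 h11 h12 h01 h02 ⊢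
    simp only [pv_hMe] at h21 h22 h11 h12 h01 h02 ⊢
    constructor <;> omega

lemma pv_inv2 : PySem.Int.floordiv (pvMOD + 1) 2 = 500000005 := by decide

-- recombination: one output entry of B equals the corresponding entry of A
lemma pv_recomb (j : Nat) :
    PySem.Int.mod (((pvS j).1 - (pvS j).2) * PySem.Int.floordiv (pvMOD + 1) 2) pvMOD = (pvOE j).1
    ∧ PySem.Int.mod (((pvS j).1 + (pvS j).2) * PySem.Int.floordiv (pvMOD + 1) 2) pvMOD = (pvOE j).2 := by
  rw [pv_inv2]
  obtain ⟨hs, ha⟩ := pv_S_modeq j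
  obtain ⟨hO0, hO1, hE0, hE1⟩ := pvOE_nonneg j
  unfold Int.ModEq at hs ha
  simp only [PySem.Int.mod_eq_emod_of_pos pv_hM] at hs ha hO1 hE1 ⊢
  simp only [pv_hMe] at hs ha hO1 hE1 ⊢
  constructor <;> omega

-- B's filled arrays coincide with A's
lemma pv_G_eq_F (K j : Nat) :
    pvGO (PySem.Int.floordiv (pvMOD + 1) 2) K j = pvFO K j
    ∧ pvGE (PySem.Int.floordiv (pvMOD + 1) 2) K j = pvFE K j := by
  obtain ⟨r1, r2⟩ := pv_recomb j
  unfold pvGO pvGE pvFO pvFE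
  constructor
  · split_ifs <;> first | exact r1 | rfl | omega |
      (exact (by omega : j = 0) ▸ rfl)
  · split_ifs <;> first | exact r2 | rfl | omega |
      (exact (by omega : j = 0) ▸ rfl)

lemma pv_init_GO (inv2 : Int) (n : Nat) :
    List.replicate n (0 : Int) = (List.range n).map (pvGO inv2 0) := by
  apply List.ext_getElem (by simp)
  intro idx h1 h2
  simp only [List.getElem_replicate, List.getElem_map, List.getElem_range]
  unfold pvGO
  split_ifs <;> first | rfl | omega

lemma pv_init_GE (inv2 : Int) (n : Nat) :
    (List.replicate n (0 : Int)).set 0 1 = (List.range n).map (pvGE inv2 0) := by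
  apply List.ext_getElem (by simp)
  intro idx h1 h2
  simp only [List.getElem_set, List.getElem_replicate, List.getElem_map, List.getElem_range]
  unfold pvGE
  split_ifs <;> first | rfl | omega

-- characterization of B
lemma pv_B_char (max_n : Int) (h : -3 ≤ max_n) :
    dp_compute_alt max_n
      = ((List.range (max_n + 4).toNat).map (pvGO (PySem.Int.floordiv (pvMOD + 1) 2) max_n.toNat),
         (List.range (max_n + 4).toNat).map (pvGE (PySem.Int.floordiv (pvMOD + 1) 2) max_n.toNat)) := by
  unfold dp_compute_alt
  dsimp only
  rw [PySem.List.pySetD_of_nonneg _ _ (by omega), show (0 : Int).toNat = 0 from rfl]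
  set inv2 := PySem.Int.floordiv (pvMOD + 1) 2 with hinv
  by_cases hpos : 0 ≤ max_n
  · rw [pv_init_GE inv2, pv_init_GO inv2]
    have base : ((1 : Int), (0 : Int), (0 : Int), (1 : Int), (0 : Int), (0 : Int))
        = (pvP ((0 : Nat) : Int), pvP (((0 : Nat) : Int) - 1), pvP (((0 : Nat) : Int) - 2),
           pvQ ((0 : Nat) : Int), pvQ (((0 : Nat) : Int) - 1), pvQ (((0 : Nat) : Int) - 2)) := by
      rw [pvP_pos _ (by omega), pvP_neg _ (by omega), pvP_neg _ (by omega),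
          pvQ_pos _ (by omega), pvQ_neg _ (by omega), pvQ_neg _ (by omega)]
      rfl
    have good := pv_loopB inv2 (max_n + 4).toNat max_n.toNat max_n.toNat 0 (by omega)
    have h1 : ((0 : Nat) : Int) + 1 = 1 := by norm_num
    rw [h1] at good
    have h2 : ((max_n.toNat : Nat) : Int) + 1 = max_n + 1 := by omega
    rw [h2] at good
    have hb0 : pvP ((0:Nat) : Int) = 1 ∧ pvQ ((0:Nat) : Int) = 1 := by
      constructor
      · rw [pvP_pos _ (by omega)]; rfl
      · rw [pvQ_pos _ (by omega)]; rfl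
    rw [show ((0:Nat) : Int) = (0 : Int) from rfl] at good
    rw [pvP_pos 0 (by omega), pvP_neg (0 - 1) (by omega), pvP_neg (0 - 2) (by omega),
        pvQ_pos 0 (by omega), pvQ_neg (0 - 1) (by omega), pvQ_neg (0 - 2) (by omega)] at good
    rw [show ((0 : Int).toNat) = 0 from rfl] at good
    rw [show (pvS 0).1 = 1 from rfl, show (pvS 0).2 = 1 from rfl] at good
    rw [good]
  · rw [PySem.List.pyRange_one_eq_nil (by omega : max_n + 1 ≤ 1)]
    have h0 : max_n.toNat = 0 := by omega
    rw [h0, pv_init_GE inv2, pv_init_GO inv2]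
    rfl

-- ===== VERDICT (by name: the statement is the Claim_ definition above) =====
theorem dp_compute_spec : Claim_equal_dp_compute := by
  intro max_n _ hpre
  unfold Spec_dp_compute
  rw [pv_A_char max_n hpre, pv_B_char max_n hpre]
  refine congrArg₂ Prod.mk ?_ ?_ <;>
    exact congrArg (fun f => List.map f (List.range (max_n + 4).toNat))
      (funext fun j => by
        first
          | exact (pv_G_eq_F max_n.toNat j).2.symm
          | exact (pv_G_eq_F max_n.toNat j).1.symm)
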